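-- pv_equiv track=rewrite | github.com/PEXEL2002/PWR_Discrete_Process_Optimization | Zad0/zad0.py | C_max
-- ===== SOURCE A (Python) =====
-- def C_max(S):
--     cMax = 0
--     cMax += S[0][0]
--     for i in range(len(S)-1):
--         cMax += S[i][1]
--         if cMax < S[i+1][0]:
--             cMax += S[i+1][0] - cMax
--     cMax += S[-1][1]
--     return cMax
-- ===== SOURCE B (Python) =====
-- def C_max(S):
--     n = len(S)
--     suf = [0] * n
--     acc = 0
--     for j in range(n - 1, -1, -1):
--         acc += S[j][1]
--         suf[j] = acc
--     return max(S[j][0] + suf[j] for j in range(n))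
-- ===== Notes on version B (the rewrite author's own statement) =====
-- stated objective: alternative
-- what changed: Replaces the sequential max-accumulator recurrence by the closed form max_j (S[j][0] + suffix sum of second-stage times from j), computed with one right-to-left suffix-sum pass and one max pass.
import Mathlib
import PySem

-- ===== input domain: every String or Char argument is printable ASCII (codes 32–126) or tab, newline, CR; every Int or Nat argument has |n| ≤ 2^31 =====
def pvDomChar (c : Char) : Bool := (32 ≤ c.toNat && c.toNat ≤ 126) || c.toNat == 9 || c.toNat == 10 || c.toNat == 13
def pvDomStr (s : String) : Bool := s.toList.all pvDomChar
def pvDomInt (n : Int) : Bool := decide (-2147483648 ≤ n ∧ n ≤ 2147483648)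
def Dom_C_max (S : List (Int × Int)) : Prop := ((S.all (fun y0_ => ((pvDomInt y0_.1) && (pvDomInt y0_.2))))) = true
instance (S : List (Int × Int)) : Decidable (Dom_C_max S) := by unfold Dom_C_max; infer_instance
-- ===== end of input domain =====

-- B replaces A's sequential max-accumulator recurrence by the closed form
-- max_j (S[j].1 + suffix sum of second components from j); same asymptotic cost, different algorithm.

-- ===== PORT A =====
def C_max (S : List (Int × Int)) : Int :=
  let cMax : Int := 0
  let cMax := cMax + (PySem.List.pyGetD S 0 (0,0)).1
  let cMax := (List.range (S.length - 1)).foldl (fun (cMax : Int) (i : Nat) =>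
      let cMax := cMax + (PySem.List.pyGetD S (i : Int) (0,0)).2
      if cMax < (PySem.List.pyGetD S ((i : Int) + 1) (0,0)).1 then
        cMax + ((PySem.List.pyGetD S ((i : Int) + 1) (0,0)).1 - cMax)
      else cMax) cMax
  cMax + (PySem.List.pyGetD S (-1) (0,0)).2

-- ===== PORT B =====
-- suffix sums of the second components, built right to left (Source B's backwards loop)
def sufList : List (Int × Int) → List Int
  | [] => []
  | p :: rest =>
    let r := sufList rest
    (p.2 + r.headD 0) :: r

def C_max_alt (S : List (Int × Int)) : Int :=
  match List.zipWith (fun p s => p.1 + s) S (sufList S) with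
  | [] => 0  -- unreachable under Pre_ (Python's max raises on an empty sequence)
  | x :: xs => xs.foldl max x

-- ===== PRECONDITION & SPEC =====
-- Pre_ excludes the empty list, on which A raises IndexError (and B's max raises ValueError).
def Pre_C_max (S : List (Int × Int)) : Prop := S ≠ []
instance (S : List (Int × Int)) : Decidable (Pre_C_max S) := by unfold Pre_C_max; infer_instance
def pvWitness_C_max : (List (Int × Int)) := [(3, 2), (1, 4), (5, 1)]

def Spec_C_max (S : List (Int × Int)) (out : Int) : Prop := out = C_max_alt S
instance (S : List (Int × Int)) (out : Int) : Decidable (Spec_C_max S out) := by unfold Spec_C_max; infer_instance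

-- ===== CLAIM (what is proved, stated in full; the proofs are below) =====
def Claim_equal_C_max : Prop := ∀ (S : List (Int × Int)), Dom_C_max S → Pre_C_max S → Spec_C_max S (C_max S)

-- ===== LEMMAS AND PROOFS =====

-- sum of second components (proof-only reference value)
def T2 : List (Int × Int) → Int
  | [] => 0
  | p :: rest => p.2 + T2 rest

-- structural form of A's loop
def gA : Int → List (Int × Int) → Int
  | c, [] => c
  | c, [p] => c + p.2
  | c, p :: q :: rest =>
      let c := c + p.2
      gA (if c < q.1 then c + (q.1 - c) else c) (q :: rest)

-- reference value: max over j of S[j].1 + suffix sum from j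
def Bv : List (Int × Int) → Int
  | [] => 0
  | [p] => p.1 + p.2
  | p :: q :: rest => max (p.1 + p.2 + T2 (q :: rest)) (Bv (q :: rest))

-- A's loop, named for the proofs (body syntactically identical to C_max's)
def ALoop (S : List (Int × Int)) (c : Int) : Int :=
  (List.range (S.length - 1)).foldl (fun (cMax : Int) (i : Nat) =>
      let cMax := cMax + (PySem.List.pyGetD S (i : Int) (0,0)).2
      if cMax < (PySem.List.pyGetD S ((i : Int) + 1) (0,0)).1 then
        cMax + ((PySem.List.pyGetD S ((i : Int) + 1) (0,0)).1 - cMax)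
      else cMax) c

theorem C_max_eq_ALoop (S : List (Int × Int)) :
    C_max S = ALoop S (0 + (PySem.List.pyGetD S 0 (0,0)).1) + (PySem.List.pyGetD S (-1) (0,0)).2 := rfl

theorem sufList_headD (l : List (Int × Int)) : (sufList l).head?.getD 0 = T2 l := by
  induction l with
  | nil => rfl
  | cons p rest ih => simp [sufList, T2, ih]

theorem foldl_max_cons (xs : List Int) : ∀ a x : Int,
    List.foldl max (max a x) xs = max a (List.foldl max x xs) := by
  induction xs with
  | nil => intro a x; rfl
  | cons y ys ih =>
    intro a x
    simp only [List.foldl_cons]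
    rw [max_assoc, ih]

theorem alt_eq_Bv : ∀ (rest : List (Int × Int)) (p : Int × Int),
    C_max_alt (p :: rest) = Bv (p :: rest) := by
  intro rest
  induction rest with
  | nil => intro p; simp [C_max_alt, sufList, Bv]
  | cons q rest' ih =>
    intro p
    have hz : List.zipWith (fun (p : Int × Int) (s : Int) => p.1 + s) (p :: q :: rest')
        (sufList (p :: q :: rest'))
        = (p.1 + (p.2 + T2 (q :: rest'))) ::
          List.zipWith (fun (p : Int × Int) (s : Int) => p.1 + s) (q :: rest')
            (sufList (q :: rest')) := by
      simp [sufList, sufList_headD, T2]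
    have hz' : List.zipWith (fun (p : Int × Int) (s : Int) => p.1 + s) (q :: rest')
        (sufList (q :: rest'))
        = (q.1 + (q.2 + T2 rest')) ::
          List.zipWith (fun (p : Int × Int) (s : Int) => p.1 + s) rest' (sufList rest') := by
      simp [sufList, sufList_headD]
    have hB : C_max_alt (q :: rest') = List.foldl max (q.1 + (q.2 + T2 rest'))
        (List.zipWith (fun (p : Int × Int) (s : Int) => p.1 + s) rest' (sufList rest')) := by
      simp [C_max_alt, hz']
    simp only [C_max_alt, hz, hz']
    rw [List.foldl_cons, foldl_max_cons, ← hB, ih q]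
    simp only [Bv, T2]
    ring_nf

theorem ALoop_shift (p q : Int × Int) (rest : List (Int × Int)) (c : Int) :
    ALoop (p :: q :: rest) c
      = ALoop (q :: rest)
          (let c := c + p.2; if c < q.1 then c + (q.1 - c) else c) := by
  have hlen : (p :: q :: rest).length - 1 = rest.length + 1 := by simp
  unfold ALoop
  rw [hlen, List.range_succ_eq_map, List.foldl_cons, List.foldl_map]
  have hlen2 : (q :: rest).length - 1 = rest.length := by simp
  rw [hlen2]
  congr 1
  · funext c' i
    simp only [Nat.succ_eq_add_one]
    have e2 : (((i + 1 : Nat)) : Int) + 1 = ((i + 2 : Nat) : Int) := by push_cast; ring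
    have e3 : ((i : Int) + 1) = ((i + 1 : Nat) : Int) := by push_cast; ring
    rw [e2, e3]
    simp only [PySem.List.pyGetD_natCast, List.getD_cons_succ]
  · have h0 : ((0 : Nat) : Int) = 0 := rfl
    simp only [h0, PySem.List.pyGetD_zero_cons]
    have e1 : ((0 : Int) + 1) = ((1 : Nat) : Int) := by norm_num
    rw [e1, PySem.List.pyGetD_natCast]
    rfl

theorem ALoop_eq_gA : ∀ (l : List (Int × Int)) (c : Int), l ≠ [] →
    ALoop l c + (PySem.List.pyGetD l (-1) (0,0)).2 = gA c l := by
  intro l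
  induction l with
  | nil => intro c h; exact absurd rfl h
  | cons p rest ih =>
    intro c _
    cases rest with
    | nil =>
      simp [ALoop, gA, PySem.List.pyGetD_neg_one ([p]) (0,0) (by simp)]
    | cons q rest' =>
      rw [ALoop_shift]
      have hlast : (PySem.List.pyGetD (p :: q :: rest') (-1) (0,0)).2
          = (PySem.List.pyGetD (q :: rest') (-1) (0,0)).2 := by
        rw [PySem.List.pyGetD_neg_one _ (0,0) (by simp),
            PySem.List.pyGetD_neg_one _ (0,0) (by simp)]
        simp [List.getLast_cons]
      rw [hlast, ih _ (by simp)]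
      rfl

theorem gA_max : ∀ (rest : List (Int × Int)) (p : Int × Int) (c : Int),
    gA (max c p.1) (p :: rest) = max (c + T2 (p :: rest)) (Bv (p :: rest)) := by
  intro rest
  induction rest with
  | nil => intro p c; simp only [gA, Bv, T2]; omega
  | cons q rest' ih =>
    intro p c
    simp only [gA]
    have hif : (if max c p.1 + p.2 < q.1
        then max c p.1 + p.2 + (q.1 - (max c p.1 + p.2))
        else max c p.1 + p.2) = max (max c p.1 + p.2) q.1 := by split_ifs <;> omega
    rw [hif, ih q (max c p.1 + p.2)]
    simp only [Bv, T2]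
    generalize Bv (q :: rest') = b
    generalize T2 rest' = t
    omega

theorem Bv_absorb : ∀ (rest : List (Int × Int)) (p : Int × Int),
    max (p.1 + T2 (p :: rest)) (Bv (p :: rest)) = Bv (p :: rest) := by
  intro rest p
  cases rest with
  | nil => simp [Bv, T2]
  | cons q rest' =>
    simp only [Bv, T2]
    generalize Bv (q :: rest') = b
    generalize T2 rest' = t
    omega

-- ===== VERDICT (by name: the statement is the Claim_ definition above) =====
theorem C_max_spec : Claim_equal_C_max := by
  intro S _ hPre
  unfold Spec_C_max
  cases S with
  | nil => exact absurd rfl hPre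
  | cons p rest =>
    rw [C_max_eq_ALoop, ALoop_eq_gA _ _ (by simp), alt_eq_Bv]
    have h0 : (0 : Int) + (PySem.List.pyGetD (p :: rest) 0 (0,0)).1 = p.1 := by
      simp [PySem.List.pyGetD_zero_cons]
    have hg := gA_max rest p p.1
    rw [max_self] at hg
    rw [h0, hg]
    exact Bv_absorb rest p
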